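-- pv_equiv track=rewrite | github.com/Juandagarc/computer-graphics-workshops | workshop-2/exercise_4.py | convert_grades
-- ===== SOURCE A (Python) =====
-- def convert_grades(numerical_grades):
--     """Converts numerical grades to letters"""
--     letter_grades = []
--
--     for grade in numerical_grades:
--         if grade >= 90:
--             letter_grades.append('A')
--         elif grade >= 80:
--             letter_grades.append('B')
--         elif grade >= 70:
--             letter_grades.append('C')
--         elif grade >= 60:
--             letter_grades.append('D')
--         else:
--             letter_grades.append('F')
--
--     return letter_grades
-- ===== SOURCE B (Python) =====
-- _THRESHOLDS = [60, 70, 80, 90]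
-- _LETTERS = ['F', 'D', 'C', 'B', 'A']
--
--
-- def _bisect_right(a, x):
--     """Index of the first element of sorted `a` strictly greater than x."""
--     lo, hi = 0, len(a)
--     while lo < hi:
--         mid = (lo + hi) // 2
--         if x < a[mid]:
--             hi = mid
--         else:
--             lo = mid + 1
--     return lo
--
--
-- def convert_grades(numerical_grades):
--     """Converts numerical grades to letters"""
--     return [_LETTERS[_bisect_right(_THRESHOLDS, g)] for g in numerical_grades]
-- ===== Notes on version B (the rewrite author's own statement) =====
-- stated objective: alternative
-- what changed: Replaces the hardcoded if/elif cascade with a data-driven threshold table [60,70,80,90] plus a parallel letter list, picking each letter by binary search (bisect_right) over the table.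
import Mathlib
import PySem

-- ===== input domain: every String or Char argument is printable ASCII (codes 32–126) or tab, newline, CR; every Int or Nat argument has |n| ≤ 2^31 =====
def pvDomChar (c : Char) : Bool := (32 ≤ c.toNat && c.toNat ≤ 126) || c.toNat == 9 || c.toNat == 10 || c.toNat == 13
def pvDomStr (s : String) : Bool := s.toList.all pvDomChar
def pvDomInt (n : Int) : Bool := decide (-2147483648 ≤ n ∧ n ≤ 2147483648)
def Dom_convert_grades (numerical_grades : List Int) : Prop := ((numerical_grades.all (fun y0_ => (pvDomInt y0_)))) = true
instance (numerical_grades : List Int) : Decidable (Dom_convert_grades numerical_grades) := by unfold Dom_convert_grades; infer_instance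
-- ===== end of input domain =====

-- B replaces A's if/elif cascade with a threshold table and a hand-written binary search (alternative data-driven formulation; return value only).
-- ===== PORT A =====
def convert_grades (numerical_grades : List Int) : List String :=
  numerical_grades.foldl (fun letter_grades grade =>
    if grade ≥ 90 then letter_grades ++ ["A"]
    else if grade ≥ 80 then letter_grades ++ ["B"]
    else if grade ≥ 70 then letter_grades ++ ["C"]
    else if grade ≥ 60 then letter_grades ++ ["D"]
    else letter_grades ++ ["F"]) []

-- ===== PORT B =====
-- hand port of Source B's _bisect_right loop (exact: mid is always in range, so getD = a[mid])
def bisectRightLoop (a : List Int) (x : Int) (lo hi : Nat) : Nat :=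
  if _h : lo < hi then
    let mid := (lo + hi) / 2
    if x < a.getD mid 0 then bisectRightLoop a x lo mid
    else bisectRightLoop a x (mid + 1) hi
  else lo
termination_by hi - lo
decreasing_by all_goals omega

def pvThresholds : List Int := [60, 70, 80, 90]
def pvLetters : List String := ["F", "D", "C", "B", "A"]

def convert_grades_alt (numerical_grades : List Int) : List String :=
  numerical_grades.map (fun g => pvLetters.getD (bisectRightLoop pvThresholds g 0 pvThresholds.length) "")

-- ===== PRECONDITION & SPEC =====
def Spec_convert_grades (numerical_grades : List Int) (out : List String) : Prop := out = convert_grades_alt numerical_grades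
instance (numerical_grades : List Int) (out : List String) : Decidable (Spec_convert_grades numerical_grades out) := by unfold Spec_convert_grades; infer_instance

-- ===== CLAIM (what is proved, stated in full; the proofs are below) =====
def Claim_equal_convert_grades : Prop := ∀ (numerical_grades : List Int), Dom_convert_grades numerical_grades → Spec_convert_grades numerical_grades (convert_grades numerical_grades)

-- ===== LEMMAS AND PROOFS =====

-- ===== VERDICT (by name: the statement is the Claim_ definition above) =====
lemma bisect_eval (g : Int) :
    bisectRightLoop pvThresholds g 0 pvThresholds.length =
      (if g < 80 then (if g < 70 then (if g < 60 then 0 else 1) else 2)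
       else (if g < 90 then 3 else 4)) := by
  simp [bisectRightLoop, pvThresholds]

lemma bisect_point (g : Int) :
    pvLetters.getD (bisectRightLoop pvThresholds g 0 pvThresholds.length) "" =
      (if g ≥ 90 then "A" else if g ≥ 80 then "B" else if g ≥ 70 then "C"
       else if g ≥ 60 then "D" else "F") := by
  rw [bisect_eval]
  split_ifs <;> first | rfl | (exfalso; omega)

theorem convert_grades_spec : Claim_equal_convert_grades := by
  intro xs _
  unfold Spec_convert_grades convert_grades convert_grades_alt
  have hfun : (fun (letter_grades : List String) (grade : Int) =>
      if grade ≥ 90 then letter_grades ++ ["A"]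
      else if grade ≥ 80 then letter_grades ++ ["B"]
      else if grade ≥ 70 then letter_grades ++ ["C"]
      else if grade ≥ 60 then letter_grades ++ ["D"]
      else letter_grades ++ ["F"]) =
      (fun acc grade => acc ++ [if grade ≥ 90 then "A" else if grade ≥ 80 then "B"
        else if grade ≥ 70 then "C" else if grade ≥ 60 then "D" else "F"]) := by
    funext acc grade; split_ifs <;> rfl
  rw [hfun, PySem.List.foldl_append_singleton_eq_map]
  exact List.map_congr_left fun g _ => (bisect_point g).symm
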